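-- pv_equiv track=rewrite | github.com/OkhotnikovFN/Yandex-Algorithms | trainings_1.0/hw_5/task_i/i.py | get_count_operations
-- ===== SOURCE A (Python) =====
-- def get_count_operations(k: int, operations: str) -> int:
--     """
--     Функция которая определяет количество экономически целесообразных способов использования робота.
--
--     :param k: количество операций, которые можно записать в память робота
--     :type k: int
--     :param operations: список операций в виде строки
--     :type operations: str
--
--     :return: количество экономически целесообразных способов использования робота
--     :rtype: int
--     """
--     result = 0
--     successful_operations_count = 0
--     for right in range(k, len(operations)):
--         if operations[right] == operations[right - k]:
--             successful_operations_count += 1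
--             result += successful_operations_count
--         else:
--             successful_operations_count = 0
--
--     return result
-- ===== SOURCE B (Python) =====
-- def get_count_operations(k: int, operations: str) -> int:
--     n = len(operations)
--     # phase 1: boolean match profile at distance k
--     matches = [operations[i] == operations[i - k] for i in range(k, n)]
--     # phase 2: split into maximal runs of consecutive matches
--     runs = []
--     current = 0
--     for m in matches:
--         if m:
--             current += 1
--         else:
--             runs.append(current)
--             current = 0
--     runs.append(current)
--     # each run of length L contributes the triangular number L*(L+1)//2
--     return sum(length * (length + 1) // 2 for length in runs)
-- ===== Notes on version B (the rewrite author's own statement) =====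
-- stated objective: alternative
-- what changed: B replaces A's step-by-step triangular accumulation (running counter added into the result at every match) with a two-phase pass: build the boolean match profile at distance k, split it into maximal runs, and sum the closed-form triangular number L*(L+1)//2 per run.
import Mathlib
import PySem

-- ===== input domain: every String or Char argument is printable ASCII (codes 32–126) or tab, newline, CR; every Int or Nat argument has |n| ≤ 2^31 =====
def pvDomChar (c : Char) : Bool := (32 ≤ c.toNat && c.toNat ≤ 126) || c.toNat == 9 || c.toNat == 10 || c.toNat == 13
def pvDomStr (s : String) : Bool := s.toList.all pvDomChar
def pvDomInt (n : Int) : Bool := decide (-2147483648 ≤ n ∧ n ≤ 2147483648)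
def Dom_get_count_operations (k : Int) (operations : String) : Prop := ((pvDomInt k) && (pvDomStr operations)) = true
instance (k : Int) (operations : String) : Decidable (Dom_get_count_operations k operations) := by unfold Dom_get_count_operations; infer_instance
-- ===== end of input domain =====

-- B trades A's incremental triangular accumulation for a match-profile / run-lengths / closed-form decomposition; same cost, different shape.

-- ===== PORT A =====
-- state: Option (result, successful_operations_count); none = IndexError raised
def pvStepA (cs : List Char) (k : Int) (st : Option (Int × Int)) (right : Int) : Option (Int × Int) :=
  match st with
  | none => none
  | some (r, c) =>
    match PySem.List.pyGet? cs right, PySem.List.pyGet? cs (right - k) with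
    | some a, some b => if a == b then some (r + c + 1, c + 1) else some (r, 0)
    | _, _ => none

def get_count_operations (k : Int) (operations : String) : Int :=
  let cs := operations.toList
  match (PySem.List.pyRange k (cs.length : Int) 1).foldl (pvStepA cs k) (some (0, 0)) with
  | some st => st.1
  | none => 0   -- IndexError: unreachable under Pre_ (0 ≤ k)

-- ===== PORT B =====
def pvTri (l : Int) : Int := PySem.Int.floordiv (l * (l + 1)) 2

def pvRunStep (st : List Int × Int) (m : Bool) : List Int × Int :=
  if m then (st.1, st.2 + 1) else (st.1 ++ [st.2], 0)

def get_count_operations_alt (k : Int) (operations : String) : Int :=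
  let cs := operations.toList
  let ms := (PySem.List.pyRange k (cs.length : Int) 1).map
    (fun i => PySem.List.pyGet? cs i == PySem.List.pyGet? cs (i - k))
  let rc := ms.foldl pvRunStep ([], 0)
  ((rc.1 ++ [rc.2]).map pvTri).sum

-- ===== PRECONDITION & SPEC =====
-- Pre_ excludes exactly k < 0, on which Python A always raises IndexError (the index right - k
-- overruns the string, or operations[k] on the empty string).
def Pre_get_count_operations (k : Int) (operations : String) : Prop := 0 ≤ k
instance (k : Int) (operations : String) : Decidable (Pre_get_count_operations k operations) := by unfold Pre_get_count_operations; infer_instance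
def pvWitness_get_count_operations : Int × String := (2, "ababab")

def Spec_get_count_operations (k : Int) (operations : String) (out : Int) : Prop := out = get_count_operations_alt k operations
instance (k : Int) (operations : String) (out : Int) : Decidable (Spec_get_count_operations k operations out) := by unfold Spec_get_count_operations; infer_instance

-- ===== CLAIM (what is proved, stated in full; the proofs are below) =====
def Claim_equal_get_count_operations : Prop := ∀ (k : Int) (operations : String), Dom_get_count_operations k operations → Pre_get_count_operations k operations → Spec_get_count_operations k operations (get_count_operations k operations)

-- ===== LEMMAS AND PROOFS =====

-- pure bool-list semantics shared by the two arithmetic lemmas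
def pvS : List Bool → Int → Int
  | [], _ => 0
  | true :: bs, c => (c + 1) + pvS bs (c + 1)
  | false :: bs, _ => pvS bs 0

def pvStepA' (p : Int × Int) (m : Bool) : Int × Int :=
  if m then (p.1 + p.2 + 1, p.2 + 1) else (p.1, 0)

lemma pvStepA_some (cs : List Char) (k : Int) (rs : List Int)
    (h : ∀ r ∈ rs, (PySem.List.pyGet? cs r).isSome ∧ (PySem.List.pyGet? cs (r - k)).isSome)
    (p : Int × Int) :
    rs.foldl (pvStepA cs k) (some p)
      = some ((rs.map (fun i => PySem.List.pyGet? cs i == PySem.List.pyGet? cs (i - k))).foldl pvStepA' p) := by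
  induction rs generalizing p with
  | nil => rfl
  | cons r rs ih =>
    obtain ⟨h1, h2⟩ := h r (List.mem_cons_self ..)
    obtain ⟨a, ha⟩ := Option.isSome_iff_exists.mp h1
    obtain ⟨b, hb⟩ := Option.isSome_iff_exists.mp h2
    have hrest := ih (fun x hx => h x (List.mem_cons_of_mem _ hx))
    rw [List.foldl_cons, List.map_cons, List.foldl_cons]
    simp only [pvStepA, ha, hb]
    by_cases hab : (a == b) = true
    · rw [if_pos hab, hrest]; simp [pvStepA', hab]
    · rw [if_neg hab, hrest]; simp [pvStepA', hab]

lemma pvFoldA_eq (bs : List Bool) (p : Int × Int) :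
    (bs.foldl pvStepA' p).1 = p.1 + pvS bs p.2 := by
  induction bs generalizing p with
  | nil => simp [pvS]
  | cons b bs ih =>
    cases b <;> simp only [List.foldl_cons, pvStepA', if_true, if_false, Bool.false_eq_true] <;>
      rw [ih] <;> simp [pvS] <;> ring

lemma pvTri_succ (c : Int) : pvTri (c + 1) = pvTri c + (c + 1) := by
  unfold pvTri
  rw [PySem.Int.floordiv_eq_ediv_of_pos (by omega), PySem.Int.floordiv_eq_ediv_of_pos (by omega)]
  obtain ⟨m, hm⟩ := Int.even_mul_succ_self c
  have h2 : (c + 1) * (c + 1 + 1) = c * (c + 1) + 2 * (c + 1) := by ring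
  omega

lemma pvFoldB_eq (bs : List Bool) (runs : List Int) (c : Int) :
    ((((bs.foldl pvRunStep (runs, c)).1) ++ [(bs.foldl pvRunStep (runs, c)).2]).map pvTri).sum
      = (runs.map pvTri).sum + pvTri c + pvS bs c := by
  induction bs generalizing runs c with
  | nil => simp [pvS]
  | cons b bs ih =>
    cases b with
    | true =>
      simp only [List.foldl_cons, pvRunStep, if_true]
      rw [ih, pvTri_succ]
      simp [pvS]
      ring
    | false =>
      simp only [List.foldl_cons, pvRunStep, Bool.false_eq_true, if_false]
      rw [ih]
      simp [pvS, pvTri]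

lemma pvTri_zero : pvTri 0 = 0 := by decide

-- ===== VERDICT (by name: the statement is the Claim_ definition above) =====
theorem get_count_operations_spec : Claim_equal_get_count_operations := by
  intro k operations _ hk
  have hk' : (0 : Int) ≤ k := hk
  simp only [Spec_get_count_operations, get_count_operations, get_count_operations_alt]
  have hsome : ∀ r ∈ PySem.List.pyRange k (operations.toList.length : Int) 1,
      (PySem.List.pyGet? operations.toList r).isSome ∧
        (PySem.List.pyGet? operations.toList (r - k)).isSome := by
    intro r hr
    rw [PySem.List.mem_pyRange_one] at hr
    refine ⟨?_, ?_⟩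
    · rw [PySem.List.pyGet?_eq_some_getElem operations.toList (by omega) (by omega)]; rfl
    · rw [PySem.List.pyGet?_eq_some_getElem operations.toList (by omega) (by omega)]; rfl
  rw [pvStepA_some operations.toList k _ hsome (0, 0)]
  simp only
  rw [pvFoldA_eq, pvFoldB_eq]
  simp [pvTri_zero]
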